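-- pv_equiv track=rewrite | github.com/MrGmo/codeWars-Python | 7kyu/uglify-word.py | uglify_word
-- ===== SOURCE A (Python) =====
-- def uglify_word(s):
--     flag = 1
--     answer = ""
--     for c in s:
--         if c.isalpha():
--             answer += c.upper() if flag else c.lower()
--             flag = 1 - flag
--         else:
--             answer += c
--             flag = 1
--     return answer
-- ===== SOURCE B (Python) =====
-- from itertools import groupby
--
-- def uglify_word(s):
--     pieces = []
--     for is_alpha, grp in groupby(s, key=str.isalpha):
--         run = list(grp)
--         if is_alpha:
--             pieces.append(''.join(ch.upper() if i % 2 == 0 else ch.lower()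
--                                   for i, ch in enumerate(run)))
--         else:
--             pieces.append(''.join(run))
--     return ''.join(pieces)
-- ===== Notes on version B (the rewrite author's own statement) =====
-- stated objective: idiomatic
-- what changed: Replaces the char-by-char loop with a mutable case flag by itertools.groupby splitting the string into maximal alpha/non-alpha runs, re-casing alpha runs by enumerate index parity and keeping other runs verbatim.
import Mathlib
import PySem

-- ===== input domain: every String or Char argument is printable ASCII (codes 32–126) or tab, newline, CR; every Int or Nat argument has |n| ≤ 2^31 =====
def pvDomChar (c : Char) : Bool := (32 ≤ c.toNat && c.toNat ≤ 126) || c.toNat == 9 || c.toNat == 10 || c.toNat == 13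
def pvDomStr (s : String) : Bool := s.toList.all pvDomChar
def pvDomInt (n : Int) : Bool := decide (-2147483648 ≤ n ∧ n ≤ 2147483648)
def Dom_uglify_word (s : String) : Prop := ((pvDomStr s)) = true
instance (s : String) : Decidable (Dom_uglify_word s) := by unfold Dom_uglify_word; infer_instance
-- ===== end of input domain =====

-- B replaces A's char-by-char loop with a case flag by a groupby split into maximal
-- alpha / non-alpha runs (idiomatic; return value only, no mutation involved).

-- ===== PORT A =====
-- the for-loop of A: state (flag, answer), branches in A's order
def uglifyGoA : List Char → Int → List Char → List Char
  | [], _, answer => answer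
  | c :: rest, flag, answer =>
    if PySem.Chars.isalpha c then
      uglifyGoA rest (1 - flag)
        (answer ++ [if flag ≠ 0 then PySem.Chars.upperChar c else PySem.Chars.lowerChar c])
    else
      uglifyGoA rest 1 (answer ++ [c])

def uglify_word (s : String) : String := String.ofList (uglifyGoA s.toList 1 [])

-- ===== PORT B =====
-- itertools.groupby(s, key=str.isalpha): maximal runs with their key
def pyGroupByAlpha (l : List Char) : List (Bool × List Char) :=
  match l with
  | [] => []
  | c :: rest =>
    let k := PySem.Chars.isalpha c
    (k, (c :: rest).takeWhile (fun x => PySem.Chars.isalpha x == k)) ::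
      pyGroupByAlpha ((c :: rest).dropWhile (fun x => PySem.Chars.isalpha x == k))
termination_by l.length
decreasing_by
  simp only [List.dropWhile_cons, beq_self_eq_true, if_true]
  exact Nat.lt_succ_of_le (List.length_dropWhile_le _ _)

-- ''.join(ch.upper() if i % 2 == 0 else ch.lower() for i, ch in enumerate(run))
def altRun (run : List Char) : List Char :=
  run.zipIdx.map (fun p =>
    if p.2 % 2 == 0 then PySem.Chars.upperChar p.1 else PySem.Chars.lowerChar p.1)

def uglify_word_alt (s : String) : String :=
  String.ofList (((pyGroupByAlpha s.toList).map
    (fun g => if g.1 then altRun g.2 else g.2)).flatten)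

-- ===== PRECONDITION & SPEC =====
def Spec_uglify_word (s : String) (out : String) : Prop := out = uglify_word_alt s
instance (s : String) (out : String) : Decidable (Spec_uglify_word s out) := by unfold Spec_uglify_word; infer_instance

-- ===== CLAIM (what is proved, stated in full; the proofs are below) =====
def Claim_equal_uglify_word : Prop := ∀ (s : String), Dom_uglify_word s → Spec_uglify_word s (uglify_word s)

-- ===== LEMMAS AND PROOFS =====

-- A's alternation on an alpha run, starting from an arbitrary flag
def altWith : Int → List Char → List Char
  | _, [] => []
  | flag, c :: r =>
    (if flag ≠ 0 then PySem.Chars.upperChar c else PySem.Chars.lowerChar c) :: altWith (1 - flag) r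

lemma altRun_eq_altWith (run : List Char) :
    ∀ k : Nat, (run.zipIdx k).map (fun p : Char × Nat =>
        if p.2 % 2 == 0 then PySem.Chars.upperChar p.1 else PySem.Chars.lowerChar p.1)
      = altWith (if k % 2 = 0 then 1 else 0) run := by
  induction run with
  | nil => intro k; simp [altWith]
  | cons c r ih =>
    intro k
    have h2 : (1 : Int) - (if k % 2 = 0 then 1 else 0) = (if (k + 1) % 2 = 0 then 1 else 0) := by
      by_cases h : k % 2 = 0
      · have h1 : (k + 1) % 2 = 1 := by omega
        simp [h, h1]
      · have hk : k % 2 = 1 := by omega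
        have h0 : (k + 1) % 2 = 0 := by omega
        simp [hk, h0]
    simp only [List.zipIdx_cons, List.map_cons, ih (k + 1), altWith, h2]
    by_cases h : k % 2 = 0
    · simp [h]
    · have hk : k % 2 = 1 := by omega
      simp [hk]

-- stepping A through an all-alpha run: output is altWith, final flag is some f'
lemma goA_alpha_run (run : List Char) (hall : ∀ x ∈ run, PySem.Chars.isalpha x = true) :
    ∀ (flag : Int) (t acc : List Char),
      ∃ f', uglifyGoA (run ++ t) flag acc = uglifyGoA t f' (acc ++ altWith flag run) := by
  induction run with
  | nil => intro flag t acc; exact ⟨flag, by simp [altWith]⟩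
  | cons c r ih =>
    intro flag t acc
    have hc : PySem.Chars.isalpha c = true := hall c (by simp)
    obtain ⟨f', hf'⟩ := ih (fun x hx => hall x (by simp [hx])) (1 - flag) t
      (acc ++ [if flag ≠ 0 then PySem.Chars.upperChar c else PySem.Chars.lowerChar c])
    refine ⟨f', ?_⟩
    simp only [List.cons_append, uglifyGoA, hc, if_true]
    rw [hf']
    simp [altWith]

-- stepping A through an all-non-alpha run with flag 1: copied verbatim, flag stays 1
lemma goA_nonalpha_run (run : List Char) (hall : ∀ x ∈ run, PySem.Chars.isalpha x = false) :
    ∀ (t acc : List Char),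
      uglifyGoA (run ++ t) 1 acc = uglifyGoA t 1 (acc ++ run) := by
  induction run with
  | nil => intro t acc; simp
  | cons c r ih =>
    intro t acc
    have hc : PySem.Chars.isalpha c = false := hall c (by simp)
    simp only [List.cons_append, uglifyGoA, hc, Bool.false_eq_true, if_false]
    rw [ih (fun x hx => hall x (by simp [hx]))]
    simp

-- a non-alpha head resets the flag on the first step, so the incoming flag is irrelevant
lemma goA_reset (d : Char) (hd : PySem.Chars.isalpha d = false) (t acc : List Char) (f : Int) :
    uglifyGoA (d :: t) f acc = uglifyGoA (d :: t) 1 acc := by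
  simp [uglifyGoA, hd]

lemma head_dropWhile_false {p : Char → Bool} {l : List Char} {d : Char} {t : List Char}
    (h : l.dropWhile p = d :: t) : p d = false := by
  have := List.head?_dropWhile_not p l
  rw [h] at this
  simpa using this

lemma goA_eq_groupBy : ∀ (n : Nat) (l : List Char), l.length ≤ n → ∀ acc,
    uglifyGoA l 1 acc
      = acc ++ ((pyGroupByAlpha l).map (fun g => if g.1 then altRun g.2 else g.2)).flatten := by
  intro n
  induction n with
  | zero =>
    intro l hl acc
    have : l = [] := List.eq_nil_of_length_eq_zero (Nat.le_zero.mp hl)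
    simp [this, uglifyGoA, pyGroupByAlpha]
  | succ n ih =>
    intro l hl acc
    match l with
    | [] => simp [uglifyGoA, pyGroupByAlpha]
    | c :: rest =>
      rw [pyGroupByAlpha]
      by_cases hc : PySem.Chars.isalpha c = true
      · -- alpha run
        simp only [hc]
        have hpred : (fun x => PySem.Chars.isalpha x == true) = (fun x => PySem.Chars.isalpha x) := by
          funext x; simp
        rw [hpred]
        set run := (c :: rest).takeWhile (fun x => PySem.Chars.isalpha x) with hrun
        set t := (c :: rest).dropWhile (fun x => PySem.Chars.isalpha x) with ht
        have hsplit : run ++ t = c :: rest := List.takeWhile_append_dropWhile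
        have hall : ∀ x ∈ run, PySem.Chars.isalpha x = true := by
          intro x hx; exact List.mem_takeWhile_imp hx
        have hlen_t : t.length ≤ n := by
          have h1 : run.length + t.length = rest.length + 1 := by
            have := congrArg List.length hsplit; simpa using this
          have hrun_pos : 0 < run.length := by
            rw [hrun]; simp [hc]
          have hl' : rest.length + 1 ≤ n + 1 := by simpa using hl
          omega
        obtain ⟨f', hf'⟩ := goA_alpha_run run hall 1 t acc
        rw [← hsplit, hf']
        have haltrun : altWith 1 run = altRun run := by
          rw [altRun, altRun_eq_altWith run 0]; simp
        have htail : uglifyGoA t f' (acc ++ altWith 1 run)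
            = (acc ++ altWith 1 run)
              ++ ((pyGroupByAlpha t).map (fun g => if g.1 then altRun g.2 else g.2)).flatten := by
          cases htm : t with
          | nil => simp [uglifyGoA, pyGroupByAlpha]
          | cons d t' =>
            have hdw : (c :: rest).dropWhile (fun x => PySem.Chars.isalpha x) = d :: t' := by
              rw [← ht, htm]
            have hd : PySem.Chars.isalpha d = false := head_dropWhile_false hdw
            rw [goA_reset d hd, ih (d :: t') (by rw [← htm]; exact hlen_t)]
        rw [htail, haltrun]
        simp
      · -- non-alpha run
        have hc' : PySem.Chars.isalpha c = false := by simpa using hc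
        simp only [hc']
        have hpred : (fun x => PySem.Chars.isalpha x == false) = (fun x => !PySem.Chars.isalpha x) := by
          funext x; cases PySem.Chars.isalpha x <;> simp
        rw [hpred]
        set run := (c :: rest).takeWhile (fun x => !PySem.Chars.isalpha x) with hrun
        set t := (c :: rest).dropWhile (fun x => !PySem.Chars.isalpha x) with ht
        have hsplit : run ++ t = c :: rest := List.takeWhile_append_dropWhile
        have hall : ∀ x ∈ run, PySem.Chars.isalpha x = false := by
          intro x hx
          have : (!PySem.Chars.isalpha x) = true :=
            List.mem_takeWhile_imp (p := fun x => !PySem.Chars.isalpha x) hx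
          simpa using this
        have hlen_t : t.length ≤ n := by
          have h1 : run.length + t.length = rest.length + 1 := by
            have := congrArg List.length hsplit; simpa using this
          have hrun_pos : 0 < run.length := by
            rw [hrun]; simp [hc']
          have hl' : rest.length + 1 ≤ n + 1 := by simpa using hl
          omega
        rw [← hsplit, goA_nonalpha_run run hall t acc, ih _ hlen_t]
        simp

-- ===== VERDICT (by name: the statement is the Claim_ definition above) =====
theorem uglify_word_spec : Claim_equal_uglify_word := by
  intro s _
  unfold Spec_uglify_word uglify_word uglify_word_alt
  rw [goA_eq_groupBy s.toList.length s.toList le_rfl []]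
  simp
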